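-- pv_equiv track=rewrite | github.com/tezheng/ModelInsider | modelexport/core/hierarchy_utils.py | count_nodes_per_tag
-- ===== SOURCE A (Python) =====
-- def count_nodes_per_tag(tagged_nodes: dict[str, str]) -> dict[str, int]:
--     """
--     Count nodes per hierarchy tag.
--
--     Args:
--         tagged_nodes: Dictionary mapping node names to hierarchy tags
--
--     Returns:
--         Dictionary mapping hierarchy tags to node counts
--     """
--     from collections import defaultdict
--
--     node_counts = defaultdict(int)
--     for _node_name, tag in tagged_nodes.items():
--         # Count nodes for each level of the hierarchy
--         parts = tag.split("/")
--         for i in range(1, len(parts) + 1):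
--             prefix = "/".join(parts[:i])
--             if prefix:
--                 node_counts[prefix] += 1
--     return dict(node_counts)
-- ===== SOURCE B (Python) =====
-- def count_nodes_per_tag(tagged_nodes: dict[str, str]) -> dict[str, int]:
--     """Count nodes per hierarchy tag, by a single character scan per tag:
--     every position of '/' closes a prefix (the text before it), and the whole
--     tag is a prefix too; empty prefixes are skipped."""
--     counts = {}
--     for tag in tagged_nodes.values():
--         acc = []
--         for ch in tag:
--             if ch == '/' and acc:
--                 p = ''.join(acc)
--                 counts[p] = counts.get(p, 0) + 1
--             acc.append(ch)
--         if acc: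
--             p = ''.join(acc)
--             counts[p] = counts.get(p, 0) + 1
--     return counts
-- ===== Notes on version B (the rewrite author's own statement) =====
-- stated objective: alternative
-- what changed: Instead of splitting each tag into parts and re-joining every growing slice parts[:i], B makes one left-to-right character scan per tag, counting the accumulated text as a prefix at each '/' and once at the end, skipping empties.
import Mathlib
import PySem

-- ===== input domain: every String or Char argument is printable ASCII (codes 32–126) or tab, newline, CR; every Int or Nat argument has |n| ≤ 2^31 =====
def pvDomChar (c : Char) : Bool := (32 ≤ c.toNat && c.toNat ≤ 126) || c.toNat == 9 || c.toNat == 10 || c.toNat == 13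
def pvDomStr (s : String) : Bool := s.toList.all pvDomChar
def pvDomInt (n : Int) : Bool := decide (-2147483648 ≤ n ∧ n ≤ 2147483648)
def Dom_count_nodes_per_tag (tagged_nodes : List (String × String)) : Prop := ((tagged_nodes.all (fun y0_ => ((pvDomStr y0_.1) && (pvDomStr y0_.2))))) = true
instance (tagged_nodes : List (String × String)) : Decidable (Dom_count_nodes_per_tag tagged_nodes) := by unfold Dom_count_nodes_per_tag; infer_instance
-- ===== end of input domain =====

-- B replaces A's split-then-rejoin-every-slice per tag by a single left-to-right character
-- scan that counts the accumulated text at each '/' and once at the end (objective: alternative).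


-- ===== PORT A =====
def count_nodes_per_tag (tagged_nodes : List (String × String)) : List (String × Int) :=
  (tagged_nodes.foldl
    (fun node_counts nt =>
      -- parts = tag.split("/"); the literal separator "/" is non-empty, so Python never raises here
      let parts : List String := (PySem.Chars.splitOn nt.2.toList ['/']).map String.ofList
      (PySem.List.pyRange 1 ((parts.length : Int) + 1) 1).foldl
        (fun nc i =>
          let pre := PySem.Str.join "/" (PySem.List.slice parts none (some i))
          if pre ≠ "" then nc.modify pre 0 (· + 1) else nc)
        node_counts)
    (PySem.Dict.empty : PySem.Dict String Int)).items

-- ===== PORT B =====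
def count_nodes_per_tag_alt (tagged_nodes : List (String × String)) : List (String × Int) :=
  (tagged_nodes.foldl
    (fun counts nt =>
      let st := nt.2.toList.foldl
        (fun (st : PySem.Dict String Int × List Char) ch =>
          ((if ch = '/' ∧ st.2 ≠ [] then st.1.modify (String.ofList st.2) 0 (· + 1) else st.1),
           st.2 ++ [ch]))
        (counts, [])
      if st.2 ≠ [] then st.1.modify (String.ofList st.2) 0 (· + 1) else st.1)
    (PySem.Dict.empty : PySem.Dict String Int)).items

-- ===== PRECONDITION & SPEC =====
def Spec_count_nodes_per_tag (tagged_nodes : List (String × String)) (out : List (String × Int)) : Prop := out = count_nodes_per_tag_alt tagged_nodes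
instance (tagged_nodes : List (String × String)) (out : List (String × Int)) : Decidable (Spec_count_nodes_per_tag tagged_nodes out) := by unfold Spec_count_nodes_per_tag; infer_instance

-- ===== CLAIM (what is proved, stated in full; the proofs are below) =====
def Claim_equal_count_nodes_per_tag : Prop := ∀ (tagged_nodes : List (String × String)), Dom_count_nodes_per_tag tagged_nodes → Spec_count_nodes_per_tag tagged_nodes (count_nodes_per_tag tagged_nodes)

-- ===== LEMMAS AND PROOFS =====

/-- `d[ofList p] += 1` with default 0: the common per-prefix step of both ports. -/
def bumpC (d : PySem.Dict String Int) (p : List Char) : PySem.Dict String Int :=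
  d.modify (String.ofList p) 0 (· + 1)

/-- Structural model of `cs.split('/')`. -/
def mySplit : List Char → List (List Char)
  | [] => [[]]
  | c :: rest =>
    if c = '/' then [] :: mySplit rest
    else
      match mySplit rest with
      | [] => [[c]]
      | p :: ps => (c :: p) :: ps

/-- The joined growing prefixes `"/".join(parts[:i])`, i = 1..len(parts), structurally. -/
def AJ : List (List Char) → List (List Char)
  | [] => []
  | p :: rest => p :: (AJ rest).map (fun q => p ++ '/' :: q)

/-- The non-empty slash-prefixes of `acc ++ cs` that end inside `cs` (or at its end),
    in left-to-right order — exactly what B's scan counts. -/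
def myPrefs (acc : List Char) : List Char → List (List Char)
  | [] => if acc = [] then [] else [acc]
  | c :: rest => (if c = '/' ∧ acc ≠ [] then [acc] else []) ++ myPrefs (acc ++ [c]) rest

lemma mySplit_ne_nil (cs : List Char) : mySplit cs ≠ [] := by
  cases cs with
  | nil => simp [mySplit]
  | cons c rest =>
    simp only [mySplit]
    split
    · simp
    · split <;> simp

lemma splitOn_go_eq (fuel : Nat) (l cur : List Char) (acc : List (List Char)) (h : l.length < fuel) :
    PySem.Chars.splitOn.go ['/'] fuel l cur acc.reverse
      = acc ++ (cur.reverse ++ (mySplit l).headI) :: (mySplit l).tail := by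
  induction fuel generalizing l cur acc with
  | zero => omega
  | succ f ih =>
    cases l with
    | nil =>
      simp [PySem.Chars.splitOn.go, mySplit]
    | cons c rest =>
      simp only [PySem.Chars.splitOn.go]
      by_cases hc : c = '/'
      · subst hc
        have hpre : List.isPrefixOf ['/'] ('/' :: rest) = true := by simp [List.isPrefixOf]
        rw [if_pos hpre]
        have := ih rest [] (acc ++ [cur.reverse]) (by simpa using Nat.lt_of_succ_lt_succ h)
        simp only [List.reverse_append, List.reverse_cons, List.reverse_nil, List.nil_append] at this ⊢
        simp [List.drop] at this ⊢
        rw [this]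
        simp only [mySplit]
        rcases hms : mySplit rest with _ | ⟨p, ps⟩
        · exact absurd hms (mySplit_ne_nil rest)
        · simp
      · have hpre : List.isPrefixOf ['/'] (c :: rest) = false := by
          simp [List.isPrefixOf]; exact fun hh => absurd hh.symm hc
        rw [if_neg (by simp [hpre])]
        have := ih rest (c :: cur) acc (by simpa using Nat.lt_of_succ_lt_succ h)
        rw [this]
        simp only [mySplit, if_neg hc]
        rcases hms : mySplit rest with _ | ⟨p, ps⟩
        · exact absurd hms (mySplit_ne_nil rest)
        · simp

lemma splitOn_eq (cs : List Char) : PySem.Chars.splitOn cs ['/'] = mySplit cs := by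
  have := splitOn_go_eq (cs.length + 1) cs [] [] (by omega)
  simp only [List.reverse_nil] at this
  rw [PySem.Chars.splitOn, this]
  rcases hms : mySplit cs with _ | ⟨p, ps⟩
  · exact absurd hms (mySplit_ne_nil cs)
  · simp

lemma AJ_eq (parts : List (List Char)) :
    (List.range parts.length).map (fun k => PySem.Chars.join ['/'] (parts.take (k + 1)))
      = AJ parts := by
  induction parts with
  | nil => simp [AJ]
  | cons p rest ih =>
    simp only [AJ, List.length_cons, List.range_succ_eq_map, List.map_cons, List.map_map]
    refine List.cons_eq_cons.mpr ⟨by simp [PySem.Chars.join_singleton], ?_⟩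
    rw [← ih, List.map_map]
    apply List.map_congr_left
    intro k hk
    have hkl : k < rest.length := List.mem_range.mp hk
    simp only [Function.comp]
    rcases ht : rest.take (k + 1) with _ | ⟨q, t⟩
    · exfalso
      have : (rest.take (k + 1)).length = k + 1 := List.length_take_of_le (by omega)
      rw [ht] at this; simp at this
    · show PySem.Chars.join ['/'] (List.take (Nat.succ k + 1) (p :: rest)) = _
      simp only [List.take_succ_cons, ht, PySem.Chars.join_cons_cons]
      simp

lemma pyRange_1_succ (n : Nat) :
    PySem.List.pyRange 1 ((n : Int) + 1) 1 = (List.range n).map (fun k : Nat => 1 + 1 * (k : Int)) := by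
  cases n with
  | zero => simp [PySem.List.pyRange]
  | succ m =>
    simp only [PySem.List.pyRange]
    rw [if_neg (by norm_num), if_pos (by norm_num), if_pos (by push_cast; omega)]
    have hc : ((((m + 1 : Nat) : Int) + 1 - 1 + 1 - 1) / 1).toNat = m + 1 := by
      push_cast; norm_num
    rw [hc]

lemma prefs_eq (cs : List Char) (acc : List Char) :
    myPrefs acc cs = ((AJ (mySplit cs)).map (acc ++ ·)).filter (fun p => decide (p ≠ [])) := by
  induction cs generalizing acc with
  | nil =>
    by_cases h : acc = [] <;> simp [myPrefs, mySplit, AJ, h]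
  | cons c rest ih =>
    by_cases hc : c = '/'
    · subst hc
      rw [show mySplit ('/' :: rest) = [] :: mySplit rest from by simp [mySplit]]
      rw [show AJ ([] :: mySplit rest) = [] :: (AJ (mySplit rest)).map (fun q => [] ++ '/' :: q) from rfl]
      simp only [List.nil_append, List.map_cons, List.map_map, List.filter_cons, List.append_nil]
      rw [show myPrefs acc ('/' :: rest)
            = (if '/' = '/' ∧ acc ≠ [] then [acc] else []) ++ myPrefs (acc ++ ['/']) rest from rfl]
      rw [ih (acc ++ ['/'])]
      have hmap : (AJ (mySplit rest)).map ((fun x => acc ++ x) ∘ fun q => '/' :: q)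
          = (AJ (mySplit rest)).map (fun x => (acc ++ ['/']) ++ x) := by
        apply List.map_congr_left; intro q _; simp
      rw [hmap]
      by_cases h : acc = [] <;> simp [h]
    · rw [show myPrefs acc (c :: rest)
            = (if c = '/' ∧ acc ≠ [] then [acc] else []) ++ myPrefs (acc ++ [c]) rest from rfl]
      rw [if_neg (by simp [hc]), List.nil_append, ih (acc ++ [c])]
      simp only [mySplit, if_neg hc]
      rcases hms : mySplit rest with _ | ⟨p, ps⟩
      · exact absurd hms (mySplit_ne_nil rest)
      · rw [show AJ ((c :: p) :: ps) = (c :: p) :: (AJ ps).map (fun q => (c :: p) ++ '/' :: q) from rfl]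
        rw [show AJ (p :: ps) = p :: (AJ ps).map (fun q => p ++ '/' :: q) from rfl]
        simp only [List.map_cons, List.map_map, List.filter_cons]
        have h1 : acc ++ [c] ++ p = acc ++ c :: p := by simp
        have hmap : (AJ ps).map ((fun x => (acc ++ [c]) ++ x) ∘ fun q => p ++ '/' :: q)
            = (AJ ps).map ((fun x => acc ++ x) ∘ fun q => (c :: p) ++ '/' :: q) := by
          apply List.map_congr_left; intro q _; simp
        rw [h1, hmap]

lemma B_scan_eq (cs : List Char) (d : PySem.Dict String Int) (acc : List Char) :
    (let st := cs.foldl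
        (fun (st : PySem.Dict String Int × List Char) ch =>
          ((if ch = '/' ∧ st.2 ≠ [] then st.1.modify (String.ofList st.2) 0 (· + 1) else st.1),
           st.2 ++ [ch]))
        (d, acc)
     if st.2 ≠ [] then st.1.modify (String.ofList st.2) 0 (· + 1) else st.1)
      = (myPrefs acc cs).foldl bumpC d := by
  induction cs generalizing d acc with
  | nil =>
    by_cases h : acc = [] <;> simp [myPrefs, bumpC, h]
  | cons c rest ih =>
    simp only [List.foldl_cons]
    rw [ih]
    simp only [myPrefs, List.foldl_append]
    by_cases h : c = '/' ∧ acc ≠ []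
    · simp [h, bumpC]
    · simp [h]

lemma join_map_ofList (L : List (List Char)) (n : Nat) :
    PySem.Str.join "/" ((L.map String.ofList).take n) = String.ofList (PySem.Chars.join ['/'] (L.take n)) := by
  rw [← List.map_take, PySem.Str.join]
  congr 1
  simp [Function.comp_def]

lemma A_inner_eq (d : PySem.Dict String Int) (tag : String) :
    (let parts : List String := (PySem.Chars.splitOn tag.toList ['/']).map String.ofList
     (PySem.List.pyRange 1 ((parts.length : Int) + 1) 1).foldl
       (fun nc i =>
         let pre := PySem.Str.join "/" (PySem.List.slice parts none (some i))
         if pre ≠ "" then nc.modify pre 0 (· + 1) else nc)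
       d)
      = (myPrefs [] tag.toList).foldl bumpC d := by
  rw [splitOn_eq]
  set L := mySplit tag.toList with hL
  show (PySem.List.pyRange 1 (((L.map String.ofList).length : Int) + 1) 1).foldl _ d = _
  rw [List.length_map, pyRange_1_succ, List.foldl_map]
  have hb : (fun (nc : PySem.Dict String Int) (k : Nat) =>
        let pre := PySem.Str.join "/" (PySem.List.slice (L.map String.ofList) none (some (1 + 1 * (k : Int))))
        if pre ≠ "" then nc.modify pre 0 (· + 1) else nc)
      = (fun (nc : PySem.Dict String Int) (k : Nat) =>
          (fun (nc : PySem.Dict String Int) (j : List Char) =>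
            if decide (j ≠ []) = true then bumpC nc j else nc)
            nc ((fun k : Nat => PySem.Chars.join ['/'] (L.take (k + 1))) k)) := by
    funext nc k
    show (let pre := PySem.Str.join "/" (PySem.List.slice (L.map String.ofList) none (some (1 + 1 * (k : Int))))
          if pre ≠ "" then nc.modify pre 0 (· + 1) else nc) = _
    have h0 : (0 : Int) ≤ 1 + 1 * (k : Int) := by positivity
    rw [show PySem.List.slice (L.map String.ofList) none (some (1 + 1 * (k : Int)))
          = (L.map String.ofList).take (1 + 1 * (k : Int)).toNat from PySem.List.slice_to _ h0]
    have h1 : (1 + 1 * (k : Int)).toNat = k + 1 := by omega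
    rw [h1, join_map_ofList]
    by_cases hj : PySem.Chars.join ['/'] (L.take (k + 1)) = []
    · simp [hj]
    · simp [hj, bumpC]
  rw [hb, ← List.foldl_map (f := fun k : Nat => PySem.Chars.join ['/'] (L.take (k + 1)))
        (g := fun (nc : PySem.Dict String Int) (j : List Char) =>
          if decide (j ≠ []) = true then bumpC nc j else nc)]
  rw [AJ_eq, ← List.foldl_filter, prefs_eq tag.toList [], ← hL]
  simp

lemma foldl_congr_fun {α β : Type} {f g : α → β → α} (h : ∀ a b, f a b = g a b)
    (l : List β) (init : α) : l.foldl f init = l.foldl g init := by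
  have hfg : f = g := funext fun a => funext fun b => h a b
  rw [hfg]

theorem count_nodes_per_tag_spec : Claim_equal_count_nodes_per_tag := by
  intro tagged_nodes _
  unfold Spec_count_nodes_per_tag count_nodes_per_tag count_nodes_per_tag_alt
  congr 1
  apply foldl_congr_fun
  intro d nt
  exact (A_inner_eq d nt.2).trans (B_scan_eq nt.2.toList d []).symm
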